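-- pv_equiv track=rewrite | github.com/Beliavsky/Pure-Fortran | xformat_statement.py | strip_comment_from_line
-- ===== SOURCE A (Python) =====
-- from typing import Dict, Iterable, List, Optional, Tuple
--
-- def strip_comment_from_line(raw: str) -> str:
--     out: List[str] = []
--     in_single = False
--     in_double = False
--     i = 0
--     while i < len(raw):
--         ch = raw[i]
--         if ch == "'" and not in_double:
--             if in_single and i + 1 < len(raw) and raw[i + 1] == "'":
--                 out.append("''")
--                 i += 2
--                 continue
--             in_single = not in_single
--             out.append(ch)
--             i += 1
--             continue
--         if ch == '"' and not in_single:
--             if in_double and i + 1 < len(raw) and raw[i + 1] == '"':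
--                 out.append('""')
--                 i += 2
--                 continue
--             in_double = not in_double
--             out.append(ch)
--             i += 1
--             continue
--         if ch == "!" and not in_single and not in_double:
--             break
--         out.append(ch)
--         i += 1
--     return "".join(out)
-- ===== SOURCE B (Python) =====
-- def strip_comment_from_line(raw: str) -> str:
--     # Find the first '!' outside of quoted strings; return the prefix before it.
--     # Doubled quotes inside a string toggle the flag twice, cancelling out,
--     # so no lookahead is needed.
--     in_single = False
--     in_double = False
--     for i, ch in enumerate(raw):
--         if ch == "'" and not in_double:
--             in_single = not in_single
--         elif ch == '"' and not in_single:
--             in_double = not in_double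
--         elif ch == "!" and not in_single and not in_double:
--             return raw[:i]
--     return raw
-- ===== Notes on version B (the rewrite author's own statement) =====
-- stated objective: simpler
-- what changed: B replaces A's char-by-char output list and doubled-quote lookahead with a single scan that only tracks the two quote flags, finds the index of the first top-level exclamation mark and returns the slice before it (doubled quotes toggle the flag twice and cancel, so no lookahead is needed).
import Mathlib
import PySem

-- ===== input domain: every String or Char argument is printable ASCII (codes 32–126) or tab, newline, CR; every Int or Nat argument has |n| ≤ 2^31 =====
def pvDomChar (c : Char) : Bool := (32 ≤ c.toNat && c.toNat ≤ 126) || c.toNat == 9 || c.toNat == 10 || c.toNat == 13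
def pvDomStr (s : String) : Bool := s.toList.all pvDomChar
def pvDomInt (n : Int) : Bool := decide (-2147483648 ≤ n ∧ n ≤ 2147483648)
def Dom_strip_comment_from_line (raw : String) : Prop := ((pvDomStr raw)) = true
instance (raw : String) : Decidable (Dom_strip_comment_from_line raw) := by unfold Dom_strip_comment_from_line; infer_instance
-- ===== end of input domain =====

-- B replaces A's output accumulator and doubled-quote lookahead with a scan that
-- only tracks the two quote flags and returns the prefix before the first
-- top-level '!' (objective: simpler).

-- ===== PORT A =====
-- A's while-loop over index i, transliterated as recursion over the remaining
-- characters; the lookahead raw[i+1] is rest.head?, and the 'i += 2' branch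
-- consumes two characters (rest.tail).
def stripGoA : List Char → Bool → Bool → List Char
  | [], _, _ => []
  | c :: rest, in_single, in_double =>
    if c = '\'' ∧ in_double = false then
      if in_single = true ∧ rest.head? = some '\'' then
        '\'' :: '\'' :: stripGoA rest.tail in_single in_double
      else
        '\'' :: stripGoA rest (!in_single) in_double
    else if c = '"' ∧ in_single = false then
      if in_double = true ∧ rest.head? = some '"' then
        '"' :: '"' :: stripGoA rest.tail in_single in_double
      else
        '"' :: stripGoA rest in_single (!in_double)
    else if c = '!' ∧ in_single = false ∧ in_double = false then
      []
    else
      c :: stripGoA rest in_single in_double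
termination_by l => l.length
decreasing_by all_goals (simp only [List.length_cons, List.length_tail]; omega)

def strip_comment_from_line (raw : String) : String :=
  String.ofList (stripGoA raw.toList false false)

-- ===== PORT B =====
-- index (relative offset) of the first '!' outside quotes, if any
def stripFindB : List Char → Bool → Bool → Option Nat
  | [], _, _ => none
  | c :: rest, in_single, in_double =>
    if c = '\'' ∧ in_double = false then
      (stripFindB rest (!in_single) in_double).map (· + 1)
    else if c = '"' ∧ in_single = false then
      (stripFindB rest in_single (!in_double)).map (· + 1)
    else if c = '!' ∧ in_single = false ∧ in_double = false then
      some 0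
    else
      (stripFindB rest in_single in_double).map (· + 1)

-- raw[:i] with 0 ≤ i ≤ len raw is exactly take i
def strip_comment_from_line_alt (raw : String) : String :=
  match stripFindB raw.toList false false with
  | some i => String.ofList (raw.toList.take i)
  | none => raw

-- ===== PRECONDITION & SPEC =====
def Spec_strip_comment_from_line (raw : String) (out : String) : Prop := out = strip_comment_from_line_alt raw
instance (raw : String) (out : String) : Decidable (Spec_strip_comment_from_line raw out) := by unfold Spec_strip_comment_from_line; infer_instance

-- ===== CLAIM (what is proved, stated in full; the proofs are below) =====
def Claim_equal_strip_comment_from_line : Prop := ∀ (raw : String), Dom_strip_comment_from_line raw → Spec_strip_comment_from_line raw (strip_comment_from_line raw)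

-- ===== LEMMAS AND PROOFS =====
-- A's accumulated output is exactly the prefix of the input before B's break index.
theorem stripGoA_eq_take : ∀ (l : List Char) (s d : Bool),
    stripGoA l s d = (match stripFindB l s d with
                      | some i => l.take i
                      | none => l)
  | [], s, d => by simp [stripGoA, stripFindB]
  | c :: rest, s, d => by
    rw [stripGoA, stripFindB]
    by_cases h1 : c = '\'' ∧ d = false
    · obtain ⟨rfl, rfl⟩ := h1
      by_cases h2 : s = true ∧ rest.head? = some '\''
      · obtain ⟨rfl, hh⟩ := h2
        rcases rest with _ | ⟨a, rest2⟩
        · simp at hh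
        · obtain rfl : a = '\'' := by simpa using hh
          rw [stripFindB]
          cases hf : stripFindB rest2 true false <;>
            simp [stripFindB, hf, stripGoA_eq_take rest2 true false]
      · cases hf : stripFindB rest (!s) false <;>
          simp [h2, hf, stripGoA_eq_take rest (!s) false]
    · by_cases h2 : c = '"' ∧ s = false
      · obtain ⟨rfl, rfl⟩ := h2
        by_cases h3 : d = true ∧ rest.head? = some '"'
        · obtain ⟨rfl, hh⟩ := h3
          rcases rest with _ | ⟨a, rest2⟩
          · simp at hh
          · obtain rfl : a = '"' := by simpa using hh
            rw [stripFindB]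
            cases hf : stripFindB rest2 false true <;>
              simp [stripFindB, h1, hf, stripGoA_eq_take rest2 false true]
        · cases hf : stripFindB rest false (!d) <;>
            simp [h1, h3, hf, stripGoA_eq_take rest false (!d)]
      · by_cases h3 : c = '!' ∧ s = false ∧ d = false
        · simp [h1, h2, h3]
        · cases hf : stripFindB rest s d <;>
            simp [h1, h2, h3, hf, stripGoA_eq_take rest s d]
termination_by l => l.length
decreasing_by all_goals (simp only [List.length_cons, List.length_tail]; omega)

-- ===== VERDICT (by name: the statement is the Claim_ definition above) =====
theorem strip_comment_from_line_spec : Claim_equal_strip_comment_from_line := by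
  intro raw _
  unfold Spec_strip_comment_from_line strip_comment_from_line strip_comment_from_line_alt
  rw [stripGoA_eq_take]
  cases stripFindB raw.toList false false <;> simp
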